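-- pv_equiv track=rewrite | github.com/enricowru/soireeweb | main/api/custom_theme_api.py | select_reference_style
-- ===== SOURCE A (Python) =====
-- def select_reference_style(event_type, colors, description):
--     """Select the most appropriate reference style based on event details"""
--     description_lower = description.lower() if description else ""
--
--     # Check for specific style keywords
--     if any(word in description_lower for word in ['balloon', 'modern', 'contemporary', 'colorful']):
--         return 'modern_balloon'
--     elif any(word in description_lower for word in ['nature', 'garden', 'butterfly', 'fairy', 'forest', 'green']):
--         return 'garden_nature'
--     elif any(word in description_lower for word in ['rustic', 'wooden', 'natural', 'organic', 'country']):
--         return 'rustic_elegant'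
--     elif any(word in description_lower for word in ['elegant', 'traditional', 'classic', 'formal', 'gold']):
--         return 'elegant_traditional'
--
--     # Default based on event type
--     if event_type.lower() in ['wedding', 'anniversary']:
--         return 'elegant_traditional'
--     elif event_type.lower() in ['kiddie', 'birthday']:
--         return 'modern_balloon'
--     elif event_type.lower() in ['christening', 'garden party']:
--         return 'garden_nature'
--     else:
--         return 'elegant_traditional'
-- ===== SOURCE B (Python) =====
-- _KEYWORD_RANK = {
--     'balloon': 0, 'modern': 0, 'contemporary': 0, 'colorful': 0,
--     'nature': 1, 'garden': 1, 'butterfly': 1, 'fairy': 1, 'forest': 1, 'green': 1,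
--     'rustic': 2, 'wooden': 2, 'natural': 2, 'organic': 2, 'country': 2,
--     'elegant': 3, 'traditional': 3, 'classic': 3, 'formal': 3, 'gold': 3,
-- }
-- _RANK_STYLE = ['modern_balloon', 'garden_nature', 'rustic_elegant', 'elegant_traditional']
-- _FALLBACK_EVENTS = ['wedding', 'anniversary', 'kiddie', 'birthday', 'christening', 'garden party']
-- _FALLBACK_STYLE = ['elegant_traditional', 'modern_balloon', 'garden_nature']
--
--
-- def select_reference_style(event_type, colors, description):
--     """Rank every matching keyword at once and take the minimum priority;
--     the event-type fallback is an index computation (position // 2) in one flat list."""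
--     description_lower = description.lower() if description else ""
--     hits = [rank for kw, rank in _KEYWORD_RANK.items() if kw in description_lower]
--     if hits:
--         return _RANK_STYLE[min(hits)]
--     et = event_type.lower()
--     idx = _FALLBACK_EVENTS.index(et) if et in _FALLBACK_EVENTS else 0
--     return _FALLBACK_STYLE[idx // 2]
-- ===== Notes on version B (the rewrite author's own statement) =====
-- stated objective: alternative
-- what changed: Instead of four ordered short-circuiting if/elif keyword checks, B scores every matching keyword with a priority rank in one pass and takes the minimum rank; the event-type fallback becomes a position lookup in one flat list with index // 2 arithmetic instead of three membership tests.
import Mathlib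
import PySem

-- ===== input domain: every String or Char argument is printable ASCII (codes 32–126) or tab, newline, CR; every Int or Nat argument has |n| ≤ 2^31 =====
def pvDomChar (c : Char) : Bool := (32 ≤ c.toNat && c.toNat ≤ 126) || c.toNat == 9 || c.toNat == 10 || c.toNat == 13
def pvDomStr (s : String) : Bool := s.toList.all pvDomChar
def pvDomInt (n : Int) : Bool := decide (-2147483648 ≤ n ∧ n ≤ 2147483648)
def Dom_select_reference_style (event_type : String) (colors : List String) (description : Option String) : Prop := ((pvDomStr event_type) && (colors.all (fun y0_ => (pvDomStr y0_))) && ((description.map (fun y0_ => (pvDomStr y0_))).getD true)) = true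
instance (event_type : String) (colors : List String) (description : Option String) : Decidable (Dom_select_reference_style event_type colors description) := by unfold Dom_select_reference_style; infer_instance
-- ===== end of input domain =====

-- ===== PORT A =====
-- B replaces A's ordered if/elif keyword checks by a min-priority scoring pass and the
-- event-type membership chain by a position // 2 arithmetic lookup (alternative decomposition).
def select_reference_style (event_type : String) (colors : List String) (description : Option String) : String :=
  let description_lower : String :=
    match description with
    | some d => if d ≠ "" then PySem.Str.lower d else ""
    | none => ""
  if ["balloon", "modern", "contemporary", "colorful"].any
      (fun word => PySem.Str.isIn word description_lower) then "modern_balloon"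
  else if ["nature", "garden", "butterfly", "fairy", "forest", "green"].any
      (fun word => PySem.Str.isIn word description_lower) then "garden_nature"
  else if ["rustic", "wooden", "natural", "organic", "country"].any
      (fun word => PySem.Str.isIn word description_lower) then "rustic_elegant"
  else if ["elegant", "traditional", "classic", "formal", "gold"].any
      (fun word => PySem.Str.isIn word description_lower) then "elegant_traditional"
  else if (PySem.Str.lower event_type) ∈ ["wedding", "anniversary"] then "elegant_traditional"
  else if (PySem.Str.lower event_type) ∈ ["kiddie", "birthday"] then "modern_balloon"
  else if (PySem.Str.lower event_type) ∈ ["christening", "garden party"] then "garden_nature"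
  else "elegant_traditional"

-- ===== PORT B =====
def keywordRank : List (String × Int) :=
  [ ("balloon", 0), ("modern", 0), ("contemporary", 0), ("colorful", 0),
    ("nature", 1), ("garden", 1), ("butterfly", 1), ("fairy", 1), ("forest", 1), ("green", 1),
    ("rustic", 2), ("wooden", 2), ("natural", 2), ("organic", 2), ("country", 2),
    ("elegant", 3), ("traditional", 3), ("classic", 3), ("formal", 3), ("gold", 3) ]

def rankStyle : List String := ["modern_balloon", "garden_nature", "rustic_elegant", "elegant_traditional"]

def fallbackEvents : List String := ["wedding", "anniversary", "kiddie", "birthday", "christening", "garden party"]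

def fallbackStyle : List String := ["elegant_traditional", "modern_balloon", "garden_nature"]

def select_reference_style_alt (event_type : String) (colors : List String) (description : Option String) : String :=
  let description_lower : String :=
    match description with
    | some d => if d ≠ "" then PySem.Str.lower d else ""
    | none => ""
  let hits : List Int := keywordRank.filterMap
    (fun p => if PySem.Str.isIn p.1 description_lower then some p.2 else none)
  match PySem.List.min? hits (fun x => x) with
  | some r => ((PySem.List.pyGet? rankStyle r).getD "")       -- in range by construction; getD matches Python's successful indexing
  | none =>
    let et := PySem.Str.lower event_type
    let idx : Int := match PySem.List.index? fallbackEvents et with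
      | some i => (i : Int)
      | none => 0
    ((PySem.List.pyGet? fallbackStyle (PySem.Int.floordiv idx 2)).getD "")

-- ===== PRECONDITION & SPEC =====
def Spec_select_reference_style (event_type : String) (colors : List String) (description : Option String) (out : String) : Prop := out = select_reference_style_alt event_type colors description
instance (event_type : String) (colors : List String) (description : Option String) (out : String) : Decidable (Spec_select_reference_style event_type colors description out) := by unfold Spec_select_reference_style; infer_instance

-- ===== CLAIM (what is proved, stated in full; the proofs are below) =====
def Claim_equal_select_reference_style : Prop := ∀ (event_type : String) (colors : List String) (description : Option String), Dom_select_reference_style event_type colors description → Spec_select_reference_style event_type colors description (select_reference_style event_type colors description)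

-- ===== LEMMAS AND PROOFS =====

def pvHit (dl : String) : (String × Int) → Option Int :=
  fun p => if PySem.Str.isIn p.1 dl then some p.2 else none

theorem min_eq_of (xs : List Int) (r : Int) (hr : r ∈ xs) (hb : ∀ x ∈ xs, r ≤ x) :
    PySem.List.min? xs (fun x => x) = some r := by
  cases h : PySem.List.min? xs (fun x => x) with
  | none =>
    rw [PySem.List.min?_eq_none_iff] at h
    subst h; simp at hr
  | some m =>
    have h1 : m ≤ r := PySem.List.min?_isMin h r hr
    have h2 : r ≤ m := hb m (PySem.List.min?_mem h)
    exact congrArg some (le_antisymm h1 h2)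

theorem mem_hits_iff (dl : String) (x : Int) :
    x ∈ keywordRank.filterMap (pvHit dl) ↔
      ∃ p ∈ keywordRank, PySem.Str.isIn p.1 dl = true ∧ p.2 = x := by
  simp [List.mem_filterMap, pvHit, Option.ite_none_right_eq_some]

theorem hits_bound (dl : String) (r : Int)
    (h : ∀ p ∈ keywordRank, p.2 < r → PySem.Str.isIn p.1 dl = false) :
    ∀ x ∈ keywordRank.filterMap (pvHit dl), r ≤ x := by
  intro x hx
  obtain ⟨p, hp, hq, he⟩ := (mem_hits_iff dl x).mp hx
  by_cases hlt : p.2 < r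
  · rw [h p hp hlt] at hq; cases hq
  · omega

theorem hits_mem (dl : String) (w : String) (r : Int)
    (hw : (w, r) ∈ keywordRank) (hq : PySem.Str.isIn w dl = true) :
    r ∈ keywordRank.filterMap (pvHit dl) :=
  (mem_hits_iff dl r).mpr ⟨(w, r), hw, hq, rfl⟩

theorem fallback_eq (et : String) :
    (if et ∈ ["wedding", "anniversary"] then "elegant_traditional"
      else if et ∈ ["kiddie", "birthday"] then "modern_balloon"
      else if et ∈ ["christening", "garden party"] then "garden_nature"
      else "elegant_traditional") =
    ((PySem.List.pyGet? fallbackStyle (PySem.Int.floordiv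
        (match PySem.List.index? fallbackEvents et with
          | some i => (i : Int)
          | none => 0) 2)).getD "") := by
  by_cases h1 : et = "wedding"; · subst h1; decide
  by_cases h2 : et = "anniversary"; · subst h2; decide
  by_cases h3 : et = "kiddie"; · subst h3; decide
  by_cases h4 : et = "birthday"; · subst h4; decide
  by_cases h5 : et = "christening"; · subst h5; decide
  by_cases h6 : et = "garden party"; · subst h6; decide
  have hni : PySem.List.index? fallbackEvents et = none := by
    rw [PySem.List.index?_eq_none_iff]
    simp [fallbackEvents, h1, h2, h3, h4, h5, h6]
  rw [hni]
  simp [h1, h2, h3, h4, h5, h6]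
  decide

theorem main_lemma (dl event_type : String) :
    (if ["balloon", "modern", "contemporary", "colorful"].any
        (fun word => PySem.Str.isIn word dl) then "modern_balloon"
      else if ["nature", "garden", "butterfly", "fairy", "forest", "green"].any
          (fun word => PySem.Str.isIn word dl) then "garden_nature"
      else if ["rustic", "wooden", "natural", "organic", "country"].any
          (fun word => PySem.Str.isIn word dl) then "rustic_elegant"
      else if ["elegant", "traditional", "classic", "formal", "gold"].any
          (fun word => PySem.Str.isIn word dl) then "elegant_traditional"
      else if (PySem.Str.lower event_type) ∈ ["wedding", "anniversary"] then "elegant_traditional"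
      else if (PySem.Str.lower event_type) ∈ ["kiddie", "birthday"] then "modern_balloon"
      else if (PySem.Str.lower event_type) ∈ ["christening", "garden party"] then "garden_nature"
      else "elegant_traditional") =
    (match PySem.List.min? (keywordRank.filterMap
        (fun p => if PySem.Str.isIn p.1 dl then some p.2 else none)) (fun x => x) with
      | some r => ((PySem.List.pyGet? rankStyle r).getD "")
      | none =>
        let et := PySem.Str.lower event_type
        let idx : Int := match PySem.List.index? fallbackEvents et with
          | some i => (i : Int)
          | none => 0
        ((PySem.List.pyGet? fallbackStyle (PySem.Int.floordiv idx 2)).getD "")) := by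
  show _ = (match PySem.List.min? (keywordRank.filterMap (pvHit dl)) (fun x => x) with
    | some r => ((PySem.List.pyGet? rankStyle r).getD "")
    | none => ((PySem.List.pyGet? fallbackStyle (PySem.Int.floordiv
        (match PySem.List.index? fallbackEvents (PySem.Str.lower event_type) with
          | some i => (i : Int)
          | none => 0) 2)).getD ""))
  cases b0 : (["balloon", "modern", "contemporary", "colorful"].any
      (fun word => PySem.Str.isIn word dl)) with
  | true =>
    obtain ⟨w, hw, hq⟩ := List.any_eq_true.mp b0
    have h0 : (0 : Int) ∈ keywordRank.filterMap (pvHit dl) := by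
      refine hits_mem dl w 0 ?_ hq
      fin_cases hw <;> decide
    have hb : ∀ x ∈ keywordRank.filterMap (pvHit dl), (0 : Int) ≤ x := by
      refine hits_bound dl 0 ?_
      intro p hp hlt
      have hge : ∀ p ∈ keywordRank, ¬ p.2 < 0 := by decide
      exact absurd hlt (hge p hp)
    rw [min_eq_of _ 0 h0 hb]
    rfl
  | false =>
    have b0' : ∀ w ∈ ["balloon", "modern", "contemporary", "colorful"],
        PySem.Str.isIn w dl = false := fun w hw => Bool.eq_false_iff.mpr (List.any_eq_false.mp b0 w hw)
    cases b1 : (["nature", "garden", "butterfly", "fairy", "forest", "green"].any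
        (fun word => PySem.Str.isIn word dl)) with
    | true =>
      obtain ⟨w, hw, hq⟩ := List.any_eq_true.mp b1
      have h1 : (1 : Int) ∈ keywordRank.filterMap (pvHit dl) := by
        refine hits_mem dl w 1 ?_ hq
        fin_cases hw <;> decide
      have hb : ∀ x ∈ keywordRank.filterMap (pvHit dl), (1 : Int) ≤ x := by
        refine hits_bound dl 1 ?_
        intro p hp hlt
        have hmem : p.1 ∈ ["balloon", "modern", "contemporary", "colorful"] := by
          have h : ∀ p ∈ keywordRank, p.2 < 1 →
              p.1 ∈ ["balloon", "modern", "contemporary", "colorful"] := by decide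
          exact h p hp hlt
        exact b0' p.1 hmem
      rw [min_eq_of _ 1 h1 hb]
      rfl
    | false =>
      have b1' : ∀ w ∈ ["nature", "garden", "butterfly", "fairy", "forest", "green"],
          PySem.Str.isIn w dl = false := fun w hw => Bool.eq_false_iff.mpr (List.any_eq_false.mp b1 w hw)
      cases b2 : (["rustic", "wooden", "natural", "organic", "country"].any
          (fun word => PySem.Str.isIn word dl)) with
      | true =>
        obtain ⟨w, hw, hq⟩ := List.any_eq_true.mp b2
        have h2 : (2 : Int) ∈ keywordRank.filterMap (pvHit dl) := by
          refine hits_mem dl w 2 ?_ hq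
          fin_cases hw <;> decide
        have hb : ∀ x ∈ keywordRank.filterMap (pvHit dl), (2 : Int) ≤ x := by
          refine hits_bound dl 2 ?_
          intro p hp hlt
          have hmem : p.1 ∈ ["balloon", "modern", "contemporary", "colorful"] ∨
              p.1 ∈ ["nature", "garden", "butterfly", "fairy", "forest", "green"] := by
            have h : ∀ p ∈ keywordRank, p.2 < 2 →
                (p.1 ∈ ["balloon", "modern", "contemporary", "colorful"] ∨
                 p.1 ∈ ["nature", "garden", "butterfly", "fairy", "forest", "green"]) := by decide
            exact h p hp hlt
          rcases hmem with hm | hm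
          · exact b0' p.1 hm
          · exact b1' p.1 hm
        rw [min_eq_of _ 2 h2 hb]
        rfl
      | false =>
        have b2' : ∀ w ∈ ["rustic", "wooden", "natural", "organic", "country"],
            PySem.Str.isIn w dl = false := fun w hw => Bool.eq_false_iff.mpr (List.any_eq_false.mp b2 w hw)
        cases b3 : (["elegant", "traditional", "classic", "formal", "gold"].any
            (fun word => PySem.Str.isIn word dl)) with
        | true =>
          obtain ⟨w, hw, hq⟩ := List.any_eq_true.mp b3
          have h3 : (3 : Int) ∈ keywordRank.filterMap (pvHit dl) := by
            refine hits_mem dl w 3 ?_ hq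
            fin_cases hw <;> decide
          have hb : ∀ x ∈ keywordRank.filterMap (pvHit dl), (3 : Int) ≤ x := by
            refine hits_bound dl 3 ?_
            intro p hp hlt
            have hmem : p.1 ∈ ["balloon", "modern", "contemporary", "colorful"] ∨
                p.1 ∈ ["nature", "garden", "butterfly", "fairy", "forest", "green"] ∨
                p.1 ∈ ["rustic", "wooden", "natural", "organic", "country"] := by
              have h : ∀ p ∈ keywordRank, p.2 < 3 →
                  (p.1 ∈ ["balloon", "modern", "contemporary", "colorful"] ∨
                   p.1 ∈ ["nature", "garden", "butterfly", "fairy", "forest", "green"] ∨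
                   p.1 ∈ ["rustic", "wooden", "natural", "organic", "country"]) := by decide
              exact h p hp hlt
            rcases hmem with hm | hm | hm
            · exact b0' p.1 hm
            · exact b1' p.1 hm
            · exact b2' p.1 hm
          rw [min_eq_of _ 3 h3 hb]
          rfl
        | false =>
          have b3' : ∀ w ∈ ["elegant", "traditional", "classic", "formal", "gold"],
              PySem.Str.isIn w dl = false := fun w hw => Bool.eq_false_iff.mpr (List.any_eq_false.mp b3 w hw)
          have hnil : keywordRank.filterMap (pvHit dl) = [] := by
            rw [List.filterMap_eq_nil_iff]
            intro p hp
            have hmem : p.1 ∈ ["balloon", "modern", "contemporary", "colorful"] ∨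
                p.1 ∈ ["nature", "garden", "butterfly", "fairy", "forest", "green"] ∨
                p.1 ∈ ["rustic", "wooden", "natural", "organic", "country"] ∨
                p.1 ∈ ["elegant", "traditional", "classic", "formal", "gold"] := by
              have h : ∀ p ∈ keywordRank,
                  (p.1 ∈ ["balloon", "modern", "contemporary", "colorful"] ∨
                   p.1 ∈ ["nature", "garden", "butterfly", "fairy", "forest", "green"] ∨
                   p.1 ∈ ["rustic", "wooden", "natural", "organic", "country"] ∨
                   p.1 ∈ ["elegant", "traditional", "classic", "formal", "gold"]) := by decide
              exact h p hp
            have hqf : PySem.Str.isIn p.1 dl = false := by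
              rcases hmem with hm | hm | hm | hm
              · exact b0' p.1 hm
              · exact b1' p.1 hm
              · exact b2' p.1 hm
              · exact b3' p.1 hm
            simp only [pvHit, hqf, Bool.false_eq_true, if_false]
          rw [hnil]
          have hmn : PySem.List.min? ([] : List Int) (fun x => x) = none := rfl
          rw [hmn]
          simp only [Bool.false_eq_true, if_false]
          exact fallback_eq (PySem.Str.lower event_type)

-- ===== VERDICT (by name: the statement is the Claim_ definition above) =====
theorem select_reference_style_spec : Claim_equal_select_reference_style := by
  intro event_type colors description _
  unfold Spec_select_reference_style select_reference_style select_reference_style_alt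
  exact main_lemma _ event_type
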